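-- pv_equiv track=rewrite | github.com/Kaper156/GA_collector | src/gacollector/collectors/overall.py | _line_gen_file_
-- ===== SOURCE A (Python) =====
-- def _line_gen_file_(file):
--     start_is_skipped = False  # is established after skip head comments and empty line
--     for line in file:
--         if not start_is_skipped:  # Skip head useless info
--             if line[:1] == '#':  # Skip comments block
--                 continue
--             if not line.strip():  # Skip empty line(s) after comments block
--                 continue
--         elif not line.strip():  # Stop before bottom avg, sum and others rows
--             break
--         yield line
--         start_is_skipped = True  # At this point head info is skipped, next empty line is exact before avg-sum rows
-- ===== SOURCE B (Python) =====
-- def _line_gen_file_(file):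
--     # Index-based: materialize lines, compute [start, start+body_len) bounds, return that slice.
--     # (Unlike A's lazy generator, this consumes `file` eagerly; the yielded lines are identical.)
--     lines = list(file)
--     n = len(lines)
--     start = n
--     for i in range(n):
--         if lines[i][:1] != '#' and lines[i].strip():
--             start = i
--             break
--     body_len = 0
--     for line in lines[start:]:
--         if not line.strip():
--             break
--         body_len += 1
--     yield from lines[start:start + body_len]
-- ===== Notes on version B (the rewrite author's own statement) =====
-- stated objective: alternative
-- what changed: Instead of A's stateful streaming generator with a start_is_skipped flag, B materializes the lines, computes the start index of the first non-comment non-blank line and the length of the following non-blank block, and returns the slice lines[start:start+body_len]; A is lazy while B consumes the input eagerly, but the returned lines are identical.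
import Mathlib
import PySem

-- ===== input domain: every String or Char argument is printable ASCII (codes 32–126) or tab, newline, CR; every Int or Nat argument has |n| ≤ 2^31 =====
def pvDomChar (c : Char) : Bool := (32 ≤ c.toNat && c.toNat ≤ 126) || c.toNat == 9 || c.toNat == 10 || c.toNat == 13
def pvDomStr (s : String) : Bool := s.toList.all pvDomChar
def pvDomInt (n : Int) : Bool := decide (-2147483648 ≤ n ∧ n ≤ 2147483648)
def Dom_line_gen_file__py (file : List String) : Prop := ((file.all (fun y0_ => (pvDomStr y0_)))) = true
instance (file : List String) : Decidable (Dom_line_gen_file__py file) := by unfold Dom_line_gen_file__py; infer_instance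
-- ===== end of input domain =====

-- B replaces A's lazy flag-driven generator by an index computation (start index of the
-- first real line, length of the non-blank block after it) plus one slice; alternative
-- decomposition, same O(n) cost. Equivalence is about the returned lines; B consumes the
-- input eagerly where A is lazy.


-- ===== PORT A =====
-- the generator's loop: state = remaining lines × start_is_skipped flag
def lineGenLoopA : List String → Bool → List String
  | [], _ => []
  | l :: rest, started =>
    if started = false then
      if PySem.Str.slice l none (some 1) = "#" then lineGenLoopA rest started
      else if PySem.Str.strip l = "" then lineGenLoopA rest started
      else l :: lineGenLoopA rest true
    else
      if PySem.Str.strip l = "" then []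
      else l :: lineGenLoopA rest true

def line_gen_file__py (file : List String) : List String :=
  lineGenLoopA file false

-- ===== PORT B =====
-- first loop of Source B: index of the first non-comment, non-blank line (length if none)
def findStartB : List String → Nat → Nat
  | [], i => i
  | l :: rest, i =>
    if PySem.Str.slice l none (some 1) ≠ "#" ∧ PySem.Str.strip l ≠ "" then i
    else findStartB rest (i + 1)

-- second loop of Source B: length of the leading non-blank block
def bodyLenB : List String → Nat
  | [] => 0
  | l :: rest => if PySem.Str.strip l = "" then 0 else bodyLenB rest + 1

def line_gen_file__py_alt (file : List String) : List String :=
  let start := findStartB file 0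
  let bodyLen := bodyLenB (PySem.List.slice file (some (start : Int)) none)
  PySem.List.slice file (some (start : Int)) (some ((start : Int) + (bodyLen : Int)))

-- ===== PRECONDITION & SPEC =====
def Spec_line_gen_file__py (file : List String) (out : List String) : Prop := out = line_gen_file__py_alt file
instance (file : List String) (out : List String) : Decidable (Spec_line_gen_file__py file out) := by unfold Spec_line_gen_file__py; infer_instance

-- ===== CLAIM (what is proved, stated in full; the proofs are below) =====
def Claim_equal_line_gen_file__py : Prop := ∀ (file : List String), Dom_line_gen_file__py file → Spec_line_gen_file__py file (line_gen_file__py file)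

-- ===== LEMMAS AND PROOFS =====
theorem findStartB_shift (xs : List String) (i : Nat) :
    findStartB xs i = i + findStartB xs 0 := by
  induction xs generalizing i with
  | nil => simp only [findStartB]; omega
  | cons l rest ih =>
    by_cases h : PySem.Str.slice l none (some 1) ≠ "#" ∧ PySem.Str.strip l ≠ ""
    · simp only [findStartB, if_pos h]; omega
    · simp only [findStartB, if_neg h]
      rw [ih (i + 1), ih 1]
      omega

theorem loopA_true_eq_take (xs : List String) :
    lineGenLoopA xs true = xs.take (bodyLenB xs) := by
  induction xs with
  | nil => rfl
  | cons l rest ih =>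
    by_cases h : PySem.Str.strip l = ""
    · simp [lineGenLoopA, bodyLenB, h]
    · simp [lineGenLoopA, bodyLenB, h, ih]

theorem loopA_false_eq (xs : List String) :
    lineGenLoopA xs false =
      (xs.drop (findStartB xs 0)).take (bodyLenB (xs.drop (findStartB xs 0))) := by
  induction xs with
  | nil => rfl
  | cons l rest ih =>
    by_cases h1 : PySem.Str.slice l none (some 1) = "#"
    · have hc : ¬ (PySem.Str.slice l none (some 1) ≠ "#" ∧ PySem.Str.strip l ≠ "") := by
        simp [h1]
      simp only [findStartB, if_neg hc, findStartB_shift rest 1, Nat.add_comm 1,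
        List.drop_succ_cons]
      simpa [lineGenLoopA, h1] using ih
    · by_cases h2 : PySem.Str.strip l = ""
      · have hc : ¬ (PySem.Str.slice l none (some 1) ≠ "#" ∧ PySem.Str.strip l ≠ "") := by
          simp [h2]
        simp only [findStartB, if_neg hc, findStartB_shift rest 1, Nat.add_comm 1,
          List.drop_succ_cons]
        simpa [lineGenLoopA, h1, h2] using ih
      · have hc : PySem.Str.slice l none (some 1) ≠ "#" ∧ PySem.Str.strip l ≠ "" := ⟨h1, h2⟩
        simp [lineGenLoopA, findStartB, hc, bodyLenB, loopA_true_eq_take]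

-- ===== VERDICT (by name: the statement is the Claim_ definition above) =====
theorem line_gen_file__py_spec : Claim_equal_line_gen_file__py := by
  intro file _
  unfold Spec_line_gen_file__py line_gen_file__py line_gen_file__py_alt
  simp only [PySem.List.slice_from_natCast, PySem.List.slice_natCast_add]
  exact loopA_false_eq file
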